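-- pv_equiv track=rewrite | github.com/sacadena/adventofcode2023 | day14.py | roll_row
-- ===== SOURCE A (Python) =====
-- def roll_row(row):
--     stop = 0
--     new_row = list(row)
--     i = 0
--     while i < len(row):
--         if row[i] == 'O':
--             val = new_row.pop(i)
--             new_row.insert(stop, val)
--             stop += 1
--         if row[i] == "#":
--             stop = i + 1
--         i += 1
--     return ''.join(new_row)
-- ===== SOURCE B (Python) =====
-- def roll_row(row):
--     out = []        # finished part of the result
--     pend = []       # non-'O' chars of the current segment, in order
--     o = 0           # number of 'O's seen in the current segment
--     for c in row:
--         if c == 'O':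
--             o += 1
--         elif c == '#':
--             out.append('O' * o)
--             out.extend(pend)
--             out.append('#')
--             o = 0
--             pend = []
--         else:
--             pend.append(c)
--     out.append('O' * o)
--     out.extend(pend)
--     return ''.join(out)
-- ===== Notes on version B (the rewrite author's own statement) =====
-- stated objective: faster
-- what changed: Replaced the pop/insert shuffling of a mutable copy (each pop/insert is a linear shift, O(n^2) total) by a single pass that counts 'O's and buffers the other characters of the current '#'-delimited segment, emitting each segment packed.
import Mathlib
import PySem

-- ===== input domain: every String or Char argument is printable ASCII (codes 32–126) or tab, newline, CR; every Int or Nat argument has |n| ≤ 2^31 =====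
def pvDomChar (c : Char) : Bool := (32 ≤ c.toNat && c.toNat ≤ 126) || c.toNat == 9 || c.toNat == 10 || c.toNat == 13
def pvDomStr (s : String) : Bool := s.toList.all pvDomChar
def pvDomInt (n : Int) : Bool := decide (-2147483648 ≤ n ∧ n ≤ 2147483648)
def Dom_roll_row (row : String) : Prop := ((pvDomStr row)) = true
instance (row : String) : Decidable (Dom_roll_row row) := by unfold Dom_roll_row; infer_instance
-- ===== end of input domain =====

-- B replaces A's quadratic pop/insert shuffling by one linear pass that counts the 'O's and
-- buffers the other characters of each '#'-delimited segment (objective: faster).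

-- ===== PORT A =====
-- A's while loop: state is (new_row, stop, i); row[i] is read from the ORIGINAL row,
-- the 'O' branch pops new_row at i and re-inserts at stop, the '#' check then sets stop.
def rollA_go (rowL : List Char) (new_row : List Char) (stop i : Nat) : List Char :=
  if h : i < rowL.length then
    if rowL[i] = 'O' then
      match PySem.List.pop? new_row (i : Int) with
      | some (v, rest) =>
          rollA_go rowL (PySem.List.insert rest (stop : Int) v)
            (if rowL[i] = '#' then i + 1 else stop + 1) (i + 1)
      | none =>  -- unreachable: new_row always has rowL's length, so pop? at i succeeds
          rollA_go rowL new_row (if rowL[i] = '#' then i + 1 else stop) (i + 1)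
    else
      rollA_go rowL new_row (if rowL[i] = '#' then i + 1 else stop) (i + 1)
  else new_row
termination_by rowL.length - i
decreasing_by all_goals omega

def roll_row (row : String) : String :=
  String.ofList (rollA_go row.toList row.toList 0 0)

-- ===== PORT B =====
-- B's for loop: state is (out, pend, o); at '#' or at the end, the segment is emitted packed.
def rollB_go (l : List Char) (out pend : List Char) (o : Nat) : List Char :=
  match l with
  | [] => out ++ List.replicate o 'O' ++ pend
  | c :: cs =>
    if c = 'O' then rollB_go cs out pend (o + 1)
    else if c = '#' then rollB_go cs (out ++ List.replicate o 'O' ++ pend ++ ['#']) [] 0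
    else rollB_go cs out (pend ++ [c]) o

def roll_row_alt (row : String) : String :=
  String.ofList (rollB_go row.toList [] [] 0)

-- ===== PRECONDITION & SPEC =====
def Spec_roll_row (row : String) (out : String) : Prop := out = roll_row_alt row
instance (row : String) (out : String) : Decidable (Spec_roll_row row out) := by unfold Spec_roll_row; infer_instance

-- ===== CLAIM (what is proved, stated in full; the proofs are below) =====
def Claim_equal_roll_row : Prop := ∀ (row : String), Dom_roll_row row → Spec_roll_row row (roll_row row)

-- ===== LEMMAS AND PROOFS =====

theorem get_at_len (P : List Char) (c : Char) (l : List Char) :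
    (P ++ c :: l)[P.length]'(by simp) = c := by
  induction P with
  | nil => rfl
  | cons p P ih => simp [ih]

theorem erase_at_len (P : List Char) (c : Char) (l : List Char) :
    (P ++ c :: l).eraseIdx P.length = P ++ l := by
  induction P with
  | nil => rfl
  | cons p P ih => simpa using ih

-- the loop invariant: A's state (new_row, stop, i) is determined by B's state (out, pend, o)
theorem go_eq (rowL : List Char) :
    ∀ (l out pend : List Char) (o i : Nat),
      rowL.drop i = l → i = out.length + o + pend.length →
      rollA_go rowL (out ++ List.replicate o 'O' ++ pend ++ l) (out.length + o) i
        = rollB_go l out pend o := by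
  intro l
  induction l with
  | nil =>
    intro out pend o i hdrop hi
    have hle : rowL.length ≤ i := List.drop_eq_nil_iff.mp hdrop
    rw [rollA_go, dif_neg (by omega)]
    simp [rollB_go]
  | cons c cs ih =>
    intro out pend o i hdrop hi
    have hlen : rowL.length - i = cs.length + 1 := by
      have := List.length_drop (l := rowL) (i := i)
      rw [hdrop] at this; simpa using this.symm
    have hlt : i < rowL.length := by omega
    have hget : rowL[i] = c := by
      have h2 := List.getElem?_drop (xs := rowL) (i := i) (j := 0)
      rw [hdrop, Nat.add_zero] at h2
      have h3 : rowL[i]? = some c := by simpa using h2.symm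
      exact (List.getElem_eq_iff hlt).mpr h3
    have hdrop' : rowL.drop (i + 1) = cs := by
      have : rowL.drop (i + 1) = (rowL.drop i).drop 1 := by rw [List.drop_drop]
      rw [this, hdrop]; simp
    rw [rollA_go, dif_pos hlt]
    simp only [hget]
    by_cases hO : c = 'O'
    · -- pop at i, insert at stop: one more 'O' in the current segment
      subst hO
      rw [if_pos rfl]
      set P : List Char := out ++ List.replicate o 'O' ++ pend with hP
      have hPlen : P.length = i := by simp [hP]; omega
      have hform : out ++ List.replicate o 'O' ++ pend ++ ('O' :: cs) = P ++ 'O' :: cs := by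
        simp [hP, List.append_assoc]
      have hilen : i < (P ++ 'O' :: cs).length := by simp [hPlen]
      have hpop : PySem.List.pop? (P ++ 'O' :: cs) (i : Int)
          = some ((P ++ 'O' :: cs)[i]'hilen, (P ++ 'O' :: cs).eraseIdx i) :=
        PySem.List.pop?_natCast _ _ hilen
      have hgetP : (P ++ 'O' :: cs)[i]'hilen = 'O' := by
        have := get_at_len P 'O' cs
        simp only [hPlen] at this
        exact this
      have herase : (P ++ 'O' :: cs).eraseIdx i = P ++ cs := by
        rw [← hPlen]; exact erase_at_len P 'O' cs
      have hstople : out.length + o ≤ (P ++ cs).length := by simp [hP]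
      have hins : PySem.List.insert (P ++ cs) ((out.length + o : Nat) : Int) 'O'
          = (P ++ cs).take (out.length + o) ++ 'O' :: (P ++ cs).drop (out.length + o) :=
        PySem.List.insert_natCast _ _ _ hstople
      have hQlen : (out ++ List.replicate o 'O').length = out.length + o := by simp
      have hQ : P ++ cs = (out ++ List.replicate o 'O') ++ (pend ++ cs) := by
        simp [hP, List.append_assoc]
      have htake : (P ++ cs).take (out.length + o) = out ++ List.replicate o 'O' := by
        rw [hQ, ← hQlen, List.take_left]
      have hdropQ : (P ++ cs).drop (out.length + o) = pend ++ cs := by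
        rw [hQ, ← hQlen, List.drop_left]
      rw [hform, hpop]
      simp only [hgetP, herase, hins, htake, hdropQ]
      rw [if_neg (by decide : ¬ ('O' : Char) = '#')]
      have harr : out ++ List.replicate o 'O' ++ 'O' :: (pend ++ cs)
          = out ++ List.replicate (o + 1) 'O' ++ pend ++ cs := by
        simp [List.replicate_succ', List.append_assoc]
      have hrec := ih out pend (o + 1) (i + 1) hdrop' (by omega)
      rw [harr]
      have hstop : out.length + o + 1 = out.length + (o + 1) := by omega
      rw [hstop, hrec]
      simp [rollB_go]
    · rw [if_neg (by rw [hget] at *; exact hO)]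
      by_cases hH : c = '#'
      · -- '#': the current segment is closed, stop jumps past it
        subst hH
        rw [if_pos rfl]
        have harr : out ++ List.replicate o 'O' ++ pend ++ ('#' :: cs)
            = (out ++ List.replicate o 'O' ++ pend ++ ['#']) ++ List.replicate 0 'O' ++ [] ++ cs := by
          simp [List.append_assoc]
        have hlen2 : i + 1 = (out ++ List.replicate o 'O' ++ pend ++ ['#']).length + 0 := by
          simp; omega
        have hrec := ih (out ++ List.replicate o 'O' ++ pend ++ ['#']) [] 0 (i + 1) hdrop'
          (by simp only [List.length_append, List.length_replicate, List.length_cons, List.length_nil]; omega)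
        rw [hlen2] at hrec
        rw [harr, hlen2, hrec]
        simp [rollB_go, hO]
      · -- any other character joins the pending part of the segment
        rw [if_neg hH]
        have harr : out ++ List.replicate o 'O' ++ pend ++ (c :: cs)
            = out ++ List.replicate o 'O' ++ (pend ++ [c]) ++ cs := by
          simp [List.append_assoc]
        have hrec := ih out (pend ++ [c]) o (i + 1) hdrop' (by simp only [List.length_append, List.length_cons, List.length_nil]; omega)
        rw [harr, hrec]
        simp [rollB_go, hO, hH]

-- ===== VERDICT (by name: the statement is the Claim_ definition above) =====
theorem roll_row_spec : Claim_equal_roll_row := by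
  intro row _
  unfold Spec_roll_row roll_row roll_row_alt
  have := go_eq row.toList row.toList [] [] 0 0 (by simp) (by simp)
  simpa using congrArg String.ofList this
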